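-- pv_equiv track=rewrite | github.com/ZhihangTang/LeetCode-Practice | 查找算法/Magic Index.py | getRightBound
-- ===== SOURCE A (Python) =====
-- def getRightBound(a):
--     low = 0
--     high = len(a) - 1
--
--     while low <= high:
--         mid = (low + high) // 2
--         if a[mid] == mid and (mid == len(a) - 1 or a[mid + 1] != mid + 1):
--             return mid
--         elif a[mid] < mid:
--             low = mid + 1
--         elif a[mid] > mid:
--             high = mid - 1
--         else:
--             low = mid + 1
--     return -1
-- ===== SOURCE B (Python) =====
-- def getRightBound(a):
--     n = len(a)
--
--     def go(offset, seg):
--         if not seg: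
--             return -1
--         k = (len(seg) - 1) // 2
--         mid = offset + k
--         v = seg[k]
--         if v == mid and (mid == n - 1 or a[mid + 1] != mid + 1):
--             return mid
--         if v > mid:
--             return go(offset, seg[:k])
--         return go(offset + k + 1, seg[k + 1:])
--
--     return go(0, a)
-- ===== Notes on version B (the rewrite author's own statement) =====
-- stated objective: alternative
-- what changed: The iterative index-pair binary search is rewritten as structural divide-and-conquer on the actual sub-segment: each call carries an offset plus the current list slice, picks its middle element, and recurses on seg[:k] or seg[k+1:] instead of moving low/high indices, with A's three non-returning branches merged into a single v>mid test.
import Mathlib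
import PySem

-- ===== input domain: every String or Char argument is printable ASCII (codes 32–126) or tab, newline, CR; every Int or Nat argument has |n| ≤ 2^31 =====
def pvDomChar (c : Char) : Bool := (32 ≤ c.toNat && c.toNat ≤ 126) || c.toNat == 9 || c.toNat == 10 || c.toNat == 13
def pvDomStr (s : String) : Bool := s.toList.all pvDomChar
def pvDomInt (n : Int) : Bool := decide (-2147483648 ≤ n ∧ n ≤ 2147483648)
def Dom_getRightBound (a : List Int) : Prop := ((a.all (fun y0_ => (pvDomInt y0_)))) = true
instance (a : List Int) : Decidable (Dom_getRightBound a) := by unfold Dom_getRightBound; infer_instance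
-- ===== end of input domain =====

-- B rewrites A's iterative index-pair binary search as structural divide-and-conquer on the
-- actual sub-segment (offset + list slice), recursing on seg.take/seg.drop instead of moving indices.


-- ===== PORT A =====
-- termination measures for the two ports (named so the proof terms are stated once)
theorem pvLoopDecR (low high : Int) (h : low ≤ high) :
    (high + 1 - (PySem.Int.floordiv (low + high) 2 + 1)).toNat < (high + 1 - low).toNat := by
  have hb := PySem.Int.floordiv_two_mid_bounds h
  have he : high + 1 - (PySem.Int.floordiv (low + high) 2 + 1) = high - PySem.Int.floordiv (low + high) 2 := by ring
  rw [he]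
  have h2 : (0:Int) < high + 1 - low := Int.sub_pos.mpr (Int.lt_add_one_iff.mpr h)
  refine (Int.toNat_lt_toNat h2).mpr ?_
  exact lt_of_le_of_lt (sub_le_sub_left hb.1 high) (sub_lt_sub_right (lt_add_one high) low)
theorem pvLoopDecL (low high : Int) (h : low ≤ high) :
    (PySem.Int.floordiv (low + high) 2 - 1 + 1 - low).toNat < (high + 1 - low).toNat := by
  have hb := PySem.Int.floordiv_two_mid_bounds h
  have he : PySem.Int.floordiv (low + high) 2 - 1 + 1 - low = PySem.Int.floordiv (low + high) 2 - low := by ring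
  rw [he]
  have h2 : (0:Int) < high + 1 - low := Int.sub_pos.mpr (Int.lt_add_one_iff.mpr h)
  refine (Int.toNat_lt_toNat h2).mpr ?_
  exact sub_lt_sub_right (lt_of_le_of_lt hb.2 (lt_add_one high)) low
theorem pvGoDecTake (seg : List Int) (hseg : seg ≠ []) :
    (seg.take ((seg.length - 1) / 2)).length < seg.length := by
  have hl : 0 < seg.length := List.length_pos_of_ne_nil hseg
  rw [List.length_take]
  exact lt_of_le_of_lt (min_le_left _ _)
    (lt_of_le_of_lt (Nat.div_le_self _ _) (Nat.sub_lt hl Nat.one_pos))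
theorem pvGoDecDrop (seg : List Int) (hseg : seg ≠ []) :
    (seg.drop ((seg.length - 1) / 2 + 1)).length < seg.length := by
  have hl : 0 < seg.length := List.length_pos_of_ne_nil hseg
  rw [List.length_drop]
  exact Nat.sub_lt hl (Nat.succ_pos _)
-- the while-loop of A, state (low, high); branches in A's order
def getRightBoundLoop (a : List Int) (low high : Int) : Int :=
  if h : low ≤ high then
    let mid := PySem.Int.floordiv (low + high) 2
    if PySem.List.pyGetD a mid 0 = mid ∧
        (mid = (a.length : Int) - 1 ∨ PySem.List.pyGetD a (mid + 1) 0 ≠ mid + 1) then mid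
    else if PySem.List.pyGetD a mid 0 < mid then getRightBoundLoop a (mid + 1) high
    else if PySem.List.pyGetD a mid 0 > mid then getRightBoundLoop a low (mid - 1)
    else getRightBoundLoop a (mid + 1) high
  else -1
termination_by (high + 1 - low).toNat
decreasing_by
  · exact pvLoopDecR low high h
  · exact pvLoopDecL low high h
  · exact pvLoopDecR low high h

def getRightBound (a : List Int) : Int :=
  getRightBoundLoop a 0 ((a.length : Int) - 1)

-- ===== PORT B =====
-- B's recursive helper go(offset, seg): recursion on the segment itself.
-- seg[k] with 0 ≤ k < len seg is exact as seg.getD k 0; the slices seg[:k], seg[k+1:] with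
-- 0 ≤ k < len seg are exact as seg.take k, seg.drop (k+1).
def getRightBoundGo (a : List Int) (offset : Int) (seg : List Int) : Int :=
  if hseg : seg = [] then -1
  else
    let k := (seg.length - 1) / 2
    let mid := offset + (k : Int)
    let v := seg.getD k 0
    if v = mid ∧ (mid = (a.length : Int) - 1 ∨ PySem.List.pyGetD a (mid + 1) 0 ≠ mid + 1) then
      mid
    else if v > mid then getRightBoundGo a offset (seg.take k)
    else getRightBoundGo a (offset + (k : Int) + 1) (seg.drop (k + 1))
termination_by seg.length
decreasing_by
  · exact pvGoDecTake seg hseg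
  · exact pvGoDecDrop seg hseg

def getRightBound_alt (a : List Int) : Int :=
  getRightBoundGo a 0 a

-- ===== PRECONDITION & SPEC =====
def Spec_getRightBound (a : List Int) (out : Int) : Prop := out = getRightBound_alt a
instance (a : List Int) (out : Int) : Decidable (Spec_getRightBound a out) := by unfold Spec_getRightBound; infer_instance

-- ===== CLAIM =====
def Claim_equal_getRightBound : Prop := ∀ (a : List Int), Dom_getRightBound a → Spec_getRightBound a (getRightBound a)

-- ===== LEMMAS AND PROOFS =====

-- the window of a between indices low and high (inclusive), as a list segment
def pvWin (a : List Int) (low high : Int) : List Int :=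
  (a.drop low.toNat).take (high + 1 - low).toNat

theorem go_step (a : List Int) (low high : Int) (h0 : 0 ≤ low) (h : low ≤ high)
    (hh : high < (a.length : Int)) :
    getRightBoundGo a low (pvWin a low high) =
      (if PySem.List.pyGetD a (PySem.Int.floordiv (low + high) 2) 0 = PySem.Int.floordiv (low + high) 2 ∧
          (PySem.Int.floordiv (low + high) 2 = (a.length : Int) - 1 ∨
            PySem.List.pyGetD a (PySem.Int.floordiv (low + high) 2 + 1) 0 ≠ PySem.Int.floordiv (low + high) 2 + 1) then
        PySem.Int.floordiv (low + high) 2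
      else if PySem.List.pyGetD a (PySem.Int.floordiv (low + high) 2) 0 > PySem.Int.floordiv (low + high) 2 then
        getRightBoundGo a low (pvWin a low (PySem.Int.floordiv (low + high) 2 - 1))
      else getRightBoundGo a (PySem.Int.floordiv (low + high) 2 + 1)
        (pvWin a (PySem.Int.floordiv (low + high) 2 + 1) high)) := by
  have hfd : PySem.Int.floordiv (low + high) 2 = (low + high) / 2 :=
    PySem.Int.floordiv_eq_ediv_of_pos (by omega)
  have hb := PySem.Int.floordiv_two_mid_bounds h
  set mid := PySem.Int.floordiv (low + high) 2 with hmiddef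
  have hlen : (pvWin a low high).length = (high + 1 - low).toNat := by
    simp [pvWin]; omega
  have hne : pvWin a low high ≠ [] := by
    intro he; rw [he] at hlen; simp at hlen; omega
  have hk : ((pvWin a low high).length - 1) / 2 = (mid - low).toNat := by
    rw [hlen]; omega
  have hv : (pvWin a low high).getD ((mid - low).toNat) 0 = PySem.List.pyGetD a mid 0 := by
    have hcast : mid = ((low.toNat + (mid - low).toNat : Nat) : Int) := by push_cast; omega
    have hR : PySem.List.pyGetD a mid 0 = a.getD (low.toNat + (mid - low).toNat) 0 := by
      rw [hcast, PySem.List.pyGetD_natCast]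
      congr 2
      omega
    have h1 : ((a.drop low.toNat).take (high + 1 - low).toNat)[(mid - low).toNat]? =
        (a.drop low.toNat)[(mid - low).toNat]? := by
      simp [show (mid - low).toNat < (high + 1 - low).toNat from by omega]
    have h2 : (a.drop low.toNat)[(mid - low).toNat]? = a[low.toNat + (mid - low).toNat]? := by
      simp
    rw [hR, pvWin, List.getD, List.getD, h1, h2]
  have hmid2 : low + ((mid - low).toNat : Int) = mid := by omega
  have htake : (pvWin a low high).take ((mid - low).toNat) = pvWin a low (mid - 1) := by
    simp only [pvWin, List.take_take]
    congr 1
    omega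
  have hdrop : (pvWin a low high).drop ((mid - low).toNat + 1) = pvWin a (mid + 1) high := by
    simp only [pvWin, List.drop_take, List.drop_drop]
    congr 1
    · omega
    · congr 1; omega
  rw [getRightBoundGo, dif_neg hne]
  simp only [hk, hv, hmid2, htake, hdrop]

theorem loop_eq_go (a : List Int) (low high : Int) :
    0 ≤ low → high < (a.length : Int) →
    getRightBoundLoop a low high = getRightBoundGo a low (pvWin a low high) := by
  fun_induction getRightBoundLoop a low high with
  | case1 low high h mid hret =>
      intro h0 hh
      rw [go_step a low high h0 h hh, if_pos hret]
  | case2 low high h mid hret hlt ih =>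
      intro h0 hh
      rw [go_step a low high h0 h hh, if_neg hret, if_neg (by omega : ¬ PySem.List.pyGetD a mid 0 > mid)]
      have hb := PySem.Int.floordiv_two_mid_bounds h
      exact ih (by omega) hh
  | case3 low high h mid hret hlt hgt ih =>
      intro h0 hh
      rw [go_step a low high h0 h hh, if_neg hret, if_pos hgt]
      have hb := PySem.Int.floordiv_two_mid_bounds h
      exact ih h0 (by omega)
  | case4 low high h mid hret hlt hgt ih =>
      intro h0 hh
      rw [go_step a low high h0 h hh, if_neg hret, if_neg hgt]
      have hb := PySem.Int.floordiv_two_mid_bounds h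
      exact ih (by omega) hh
  | case5 low high h =>
      intro h0 hh
      have hw : pvWin a low high = [] := by
        have : (high + 1 - low).toNat = 0 := by omega
        simp [pvWin, this]
      rw [hw, getRightBoundGo, dif_pos rfl]

-- ===== VERDICT =====
theorem getRightBound_spec : Claim_equal_getRightBound := by
  intro a _
  unfold Spec_getRightBound getRightBound getRightBound_alt
  rw [loop_eq_go a 0 ((a.length : Int) - 1) le_rfl (by omega)]
  congr 1
  simp [pvWin]
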